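-- pv_equiv track=rewrite | github.com/ShuvalovAnthony/ege | 9/5724/5724.py | check
-- ===== SOURCE A (Python) =====
-- def check(nums):
--     v_goru = True
--     nums = list(nums)
--     if (nums.index(min(nums)) in (0, 4)): return False
--
--     for i in range(len(nums) - 1):
--         if (nums[i + 1] < nums[i]):
--             if v_goru:
--                 pass
--             else:
--                 return False
--         else:
--             v_goru = False
--
--     return True
-- ===== SOURCE B (Python) =====
-- def check(nums):
--     nums = list(nums)
--     p = nums.index(min(nums))
--     if p in (0, 4):
--         return False
--     head = nums[:p + 1]
--     tail = nums[p:]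
--     return all(a > b for a, b in zip(head, head[1:])) and all(a <= b for a, b in zip(tail, tail[1:]))
-- ===== Notes on version B (the rewrite author's own statement) =====
-- stated objective: alternative
-- what changed: Replaces A's single flag-flipping scan with an explicit split at the first index of the minimum, checking that the prefix up to it is strictly decreasing and the suffix from it is non-decreasing via two adjacent-pair checks.
import Mathlib
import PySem

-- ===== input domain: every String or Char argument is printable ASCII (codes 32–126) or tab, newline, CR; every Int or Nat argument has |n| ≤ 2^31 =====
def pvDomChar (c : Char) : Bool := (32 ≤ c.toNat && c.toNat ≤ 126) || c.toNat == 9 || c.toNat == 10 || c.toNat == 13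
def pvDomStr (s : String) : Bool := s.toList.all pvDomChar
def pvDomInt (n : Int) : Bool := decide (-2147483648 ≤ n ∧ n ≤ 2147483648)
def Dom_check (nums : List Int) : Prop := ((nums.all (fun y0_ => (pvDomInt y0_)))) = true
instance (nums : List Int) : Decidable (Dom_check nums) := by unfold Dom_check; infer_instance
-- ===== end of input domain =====

-- B re-implements A's single flag-flipping scan as an explicit split at the first index of
-- the minimum with two adjacent-pair monotonicity checks; equivalence is proved for nonempty input.

-- ===== PORT A =====
-- the for-loop over range(len(nums)-1) with the v_goru flag and early 'return False'
def checkLoopA : List Int → Bool → Bool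
  | a :: b :: rest, v =>
    if b < a then
      (if v then checkLoopA (b :: rest) v else false)
    else checkLoopA (b :: rest) false
  | _, _ => true

def check (nums : List Int) : Bool :=
  match PySem.List.min? nums (fun x => x) with
  | none => false            -- Python: min([]) raises ValueError (outside Pre_check)
  | some m =>
    match PySem.List.index? nums m with
    | none => false          -- unreachable: the minimum is a member
    | some p =>
      if p = 0 ∨ p = 4 then false
      else checkLoopA nums true

-- ===== PORT B =====
-- all(a > b for a, b in zip(l, l[1:]))  /  all(a <= b for a, b in zip(l, l[1:]))
def allAdjGt (l : List Int) : Bool := (l.zip l.tail).all fun ab => decide (ab.1 > ab.2)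
def allAdjLe (l : List Int) : Bool := (l.zip l.tail).all fun ab => decide (ab.1 ≤ ab.2)

def check_alt (nums : List Int) : Bool :=
  match PySem.List.min? nums (fun x => x) with
  | none => false            -- Python: min([]) raises ValueError (outside Pre_check)
  | some m =>
    match PySem.List.index? nums m with
    | none => false          -- unreachable: the minimum is a member
    | some p =>
      if p = 0 ∨ p = 4 then false
      else
        allAdjGt (PySem.List.slice nums none (some ((p : Int) + 1))) &&
        allAdjLe (PySem.List.slice nums (some (p : Int)) none)

-- ===== PRECONDITION & SPEC =====
-- Pre_check excludes only the empty list, on which both A and B raise ValueError (min of empty sequence).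
def Pre_check (nums : List Int) : Prop := nums ≠ []
instance (nums : List Int) : Decidable (Pre_check nums) := by unfold Pre_check; infer_instance
def pvWitness_check : List Int := [3, 1, 2, 2, 5]

def Spec_check (nums : List Int) (out : Bool) : Prop := out = check_alt nums
instance (nums : List Int) (out : Bool) : Decidable (Spec_check nums out) := by unfold Spec_check; infer_instance

-- ===== CLAIM (what is proved, stated in full; the proofs are below) =====
def Claim_equal_check : Prop := ∀ (nums : List Int), Dom_check nums → Pre_check nums → Spec_check nums (check nums)

-- ===== LEMMAS AND PROOFS =====

lemma checkLoopA_false_iff (l : List Int) :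
    checkLoopA l false = true ↔ l.IsChain (· ≤ ·) := by
  induction l with
  | nil => simp [checkLoopA]
  | cons a t ih =>
    cases t with
    | nil => simp [checkLoopA]
    | cons b r =>
      by_cases h : b < a
      · simp only [checkLoopA, if_pos h, List.isChain_cons_cons]
        constructor
        · intro hf; exact absurd hf (by simp)
        · intro hh; omega
      · simp only [checkLoopA, if_neg h, List.isChain_cons_cons]
        rw [ih]
        constructor
        · intro hh; exact ⟨by omega, hh⟩
        · intro hh; exact hh.2

lemma checkLoopA_true_iff (l : List Int) (hne : l ≠ []) :
    checkLoopA l true = true ↔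
      ∃ k, k < l.length ∧ (l.take (k + 1)).IsChain (· > ·) ∧ (l.drop k).IsChain (· ≤ ·) := by
  induction l with
  | nil => exact absurd rfl hne
  | cons a t ih =>
    cases t with
    | nil =>
      constructor
      · intro _; exact ⟨0, by simp, by simp, by simp⟩
      · intro _; rfl
    | cons b r =>
      by_cases h : b < a
      · have ihh := ih (by simp)
        have hred : checkLoopA (a :: b :: r) true = checkLoopA (b :: r) true := by
          simp [checkLoopA, h]
        rw [hred, ihh]
        constructor
        · rintro ⟨k, hk, h1, h2⟩
          refine ⟨k + 1, by simpa using Nat.succ_lt_succ hk, ?_, ?_⟩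
          · have he : (a :: b :: r).take (k + 1 + 1) = a :: (b :: r).take (k + 1) := rfl
            rw [he]
            rcases k with _ | k
            · simpa [List.isChain_cons_cons] using h
            · have he2 : ((b :: r).take (k + 1 + 1)) = b :: r.take (k + 1) := rfl
              rw [he2] at h1 ⊢
              exact List.isChain_cons_cons.mpr ⟨h, h1⟩
          · simpa using h2
        · rintro ⟨k, hk, h1, h2⟩
          rcases k with _ | k
          · exfalso
            simp only [List.drop_zero, List.isChain_cons_cons] at h2
            omega
          · refine ⟨k, by simpa using Nat.lt_of_succ_lt_succ hk, ?_, by simpa using h2⟩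
            have he : (a :: b :: r).take (k + 1 + 1) = a :: (b :: r).take (k + 1) := rfl
            rw [he] at h1
            rcases k with _ | k
            · simp
            · have hbt : ((b :: r).take (k + 1 + 1)) = b :: r.take (k + 1) := rfl
              rw [hbt] at h1 ⊢
              exact (List.isChain_cons_cons.mp h1).2
      · have hle : a ≤ b := by omega
        have hred : checkLoopA (a :: b :: r) true = checkLoopA (b :: r) false := by
          simp [checkLoopA, h]
        rw [hred, checkLoopA_false_iff]
        constructor
        · intro hc
          exact ⟨0, by simp, by simp, by
            simpa [List.isChain_cons_cons] using And.intro hle hc⟩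
        · rintro ⟨k, hk, h1, h2⟩
          rcases k with _ | k
          · simp only [List.drop_zero, List.isChain_cons_cons] at h2
            exact h2.2
          · exfalso
            have he : (a :: b :: r).take (k + 1 + 1) = a :: b :: (r.take k) := rfl
            rw [he, List.isChain_cons_cons] at h1
            omega

lemma allAdjGt_iff (l : List Int) : allAdjGt l = true ↔ l.IsChain (· > ·) := by
  induction l with
  | nil => simp [allAdjGt]
  | cons a t ih =>
    cases t with
    | nil => simp [allAdjGt]
    | cons b r =>
      simp only [allAdjGt, List.tail_cons, List.zip_cons_cons, List.all_cons,
        Bool.and_eq_true, decide_eq_true_iff, List.isChain_cons_cons] at ih ⊢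
      exact and_congr_right fun _ => ih

lemma allAdjLe_iff (l : List Int) : allAdjLe l = true ↔ l.IsChain (· ≤ ·) := by
  induction l with
  | nil => simp [allAdjLe]
  | cons a t ih =>
    cases t with
    | nil => simp [allAdjLe]
    | cons b r =>
      simp only [allAdjLe, List.tail_cons, List.zip_cons_cons, List.all_cons,
        Bool.and_eq_true, decide_eq_true_iff, List.isChain_cons_cons] at ih ⊢
      exact and_congr_right fun _ => ih

-- the split position of a valid peak/valley pattern is forced to be the first index of the minimum
lemma split_forced (nums : List Int) (m : Int) (p k : Nat)
    (hmin : PySem.List.min? nums (fun x => x) = some m)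
    (hidx : PySem.List.index? nums m = some p)
    (hk : k < nums.length)
    (h1 : (nums.take (k + 1)).IsChain (· > ·))
    (h2 : (nums.drop k).IsChain (· ≤ ·)) : k = p := by
  obtain ⟨hp, hpm, hfirst⟩ := PySem.List.getElem_of_index?_eq_some hidx
  have hmins : ∀ y ∈ nums, m ≤ y := PySem.List.min?_isMin hmin
  have pw1 : (nums.take (k + 1)).Pairwise (· > ·) := List.isChain_iff_pairwise.mp h1
  have pw2 : (nums.drop k).Pairwise (· ≤ ·) := List.isChain_iff_pairwise.mp h2
  rw [List.pairwise_iff_getElem] at pw1 pw2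
  have hlen1 : (nums.take (k + 1)).length = k + 1 := by simp; omega
  have hlen2 : (nums.drop k).length = nums.length - k := by simp
  by_cases hpk : p < k
  · -- then nums[p] > nums[k], but nums[p] = m ≤ nums[k]
    have hgt : nums[p] > nums[k] := by
      have := pw1 p k (by omega) (by omega) hpk
      simpa [List.getElem_take] using this
    have hmk : m ≤ nums[k] := hmins _ (List.getElem_mem hk)
    rw [hpm] at hgt
    omega
  · -- p ≥ k; if k < p then nums[k] = m contradicts p being the FIRST index of m
    rcases Nat.eq_or_lt_of_le (Nat.le_of_not_lt hpk) with heq | hlt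
    · omega
    · exfalso
      have hle2 : nums[k] ≤ nums[p] := by
        have := pw2 0 (p - k) (by omega) (by omega) (by omega)
        simpa [List.getElem_drop, Nat.add_sub_cancel' (Nat.le_of_lt hlt)] using this
      have hmk : m ≤ nums[k] := hmins _ (List.getElem_mem hk)
      have hkm : nums[k]'hk = m := le_antisymm (by rw [hpm] at hle2; exact hle2) hmk
      exact hfirst k hlt hkm

-- ===== VERDICT (by name: the statement is the Claim_ definition above) =====
theorem check_spec : Claim_equal_check := by
  intro nums _ hpre
  unfold Spec_check check check_alt
  cases hm : PySem.List.min? nums (fun x => x) with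
  | none => rfl
  | some m =>
    have hmem : m ∈ nums := PySem.List.min?_mem hm
    cases hp : PySem.List.index? nums m with
    | none =>
      exfalso
      rw [PySem.List.index?_eq_none_iff] at hp
      exact hp hmem
    | some p =>
      simp only [hp]
      by_cases hg : p = 0 ∨ p = 4
      · simp only [if_pos hg]
      · simp only [if_neg hg]
        obtain ⟨hplen, hpm, hfirst⟩ := PySem.List.getElem_of_index?_eq_some hp
        have hcast : ((p : Int) + 1) = ((p + 1 : Nat) : Int) := by push_cast; ring
        rw [hcast, PySem.List.slice_to_natCast, PySem.List.slice_from_natCast]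
        rw [Bool.eq_iff_iff, Bool.and_eq_true, allAdjGt_iff, allAdjLe_iff,
          checkLoopA_true_iff nums hpre]
        constructor
        · rintro ⟨k, hk, h1, h2⟩
          have := split_forced nums m p k hm hp hk h1 h2
          subst this
          exact ⟨h1, h2⟩
        · rintro ⟨h1, h2⟩
          exact ⟨p, hplen, h1, h2⟩
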